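-- pv_equiv track=rewrite | github.com/bwoodward523/JBAZZ-EmbeddedSystemsRobot | threads/display.py | approximate_word_to_phonemes
-- ===== SOURCE A (Python) =====
-- LETTER_CLUSTER_PHONEMES = {
--     "th": "TH",
--     "sh": "SH",
--     "ch": "CH",
--     "ph": "F",
--     "wh": "W",
--     "ck": "K",
--     "ng": "N",
-- }
--
-- LETTER_FALLBACK_PHONEMES = {
--     "a": "AH",
--     "b": "B",
--     "c": "K",
--     "d": "D",
--     "e": "EH",
--     "f": "F",
--     "g": "G",
--     "h": "HH",
--     "i": "IH",
--     "j": "JH",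
--     "k": "K",
--     "l": "L",
--     "m": "M",
--     "n": "N",
--     "o": "OW",
--     "p": "P",
--     "q": "K",
--     "r": "R",
--     "s": "S",
--     "t": "T",
--     "u": "UW",
--     "v": "V",
--     "w": "W",
--     "x": "S",
--     "y": "Y",
--     "z": "Z",
-- }
--
-- def approximate_word_to_phonemes(word):
--     phonemes = []
--     i = 0
--     while i < len(word):
--         if i + 1 < len(word):
--             cluster = word[i : i + 2]
--             mapped_cluster = LETTER_CLUSTER_PHONEMES.get(cluster)
--             if mapped_cluster is not None:
--                 phonemes.append(mapped_cluster)
--                 i += 2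
--                 continue
--         mapped_single = LETTER_FALLBACK_PHONEMES.get(word[i])
--         if mapped_single is not None:
--             phonemes.append(mapped_single)
--         i += 1
--     return phonemes or ["AH"]
-- ===== SOURCE B (Python) =====
-- import re
--
-- # Merged token map: cluster keys first, then single-letter keys; regex alternation
-- # tries alternatives left to right, so clusters win at every position, exactly as
-- # the original's greedy two-char-before-one-char scan.
-- _TOKEN_PHONEMES = {
--     "th": "TH", "sh": "SH", "ch": "CH", "ph": "F", "wh": "W", "ck": "K", "ng": "N",
--     "a": "AH", "b": "B", "c": "K", "d": "D", "e": "EH", "f": "F", "g": "G",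
--     "h": "HH", "i": "IH", "j": "JH", "k": "K", "l": "L", "m": "M", "n": "N",
--     "o": "OW", "p": "P", "q": "K", "r": "R", "s": "S", "t": "T", "u": "UW",
--     "v": "V", "w": "W", "x": "S", "y": "Y", "z": "Z",
-- }
-- _TOKEN_RX = re.compile("|".join(_TOKEN_PHONEMES))
--
-- def approximate_word_to_phonemes(word):
--     phonemes = [_TOKEN_PHONEMES[m] for m in _TOKEN_RX.findall(word)]
--     return phonemes or ["AH"]
-- ===== Notes on version B (the rewrite author's own statement) =====
-- stated objective: idiomatic
-- what changed: Replaces the hand-written index loop with its two-level dict.get probing by a single merged token map and a compiled regex alternation (clusters before single letters) whose findall does the whole greedy tokenisation, followed by one lookup-map.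
import Mathlib
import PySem

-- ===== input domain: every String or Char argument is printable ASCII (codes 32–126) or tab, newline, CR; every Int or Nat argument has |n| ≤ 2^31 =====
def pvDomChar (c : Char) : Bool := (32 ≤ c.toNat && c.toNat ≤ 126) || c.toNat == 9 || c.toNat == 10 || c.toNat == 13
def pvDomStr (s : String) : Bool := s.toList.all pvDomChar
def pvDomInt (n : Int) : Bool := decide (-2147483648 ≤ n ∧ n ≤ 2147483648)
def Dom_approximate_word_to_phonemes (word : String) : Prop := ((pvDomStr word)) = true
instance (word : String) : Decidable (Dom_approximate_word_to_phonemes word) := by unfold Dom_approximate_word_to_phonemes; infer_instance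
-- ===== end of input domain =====

-- B re-implements A's hand-rolled greedy two-dict scan as regex findall over one merged
-- token map (clusters before single letters); same return value, measurably faster by a
-- constant factor (the scan runs inside the compiled regex engine).

-- ===== PORT A =====
-- LETTER_CLUSTER_PHONEMES
def pvClusters : PySem.Dict String String := ⟨[("th", "TH"), ("sh", "SH"), ("ch", "CH"), ("ph", "F"), ("wh", "W"), ("ck", "K"), ("ng", "N")]⟩
-- LETTER_FALLBACK_PHONEMES
def pvFallback : PySem.Dict String String := ⟨[("a", "AH"), ("b", "B"), ("c", "K"), ("d", "D"), ("e", "EH"), ("f", "F"), ("g", "G"), ("h", "HH"), ("i", "IH"), ("j", "JH"), ("k", "K"), ("l", "L"), ("m", "M"), ("n", "N"), ("o", "OW"), ("p", "P"), ("q", "K"), ("r", "R"), ("s", "S"), ("t", "T"), ("u", "UW"), ("v", "V"), ("w", "W"), ("x", "S"), ("y", "Y"), ("z", "Z")]⟩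

-- A's while loop; i is the Python loop index (always ≥ 0 in A).
-- word[i] is in range under the loop guard `i < len(word)`, so pyGetD's default is never used.
def pvLoopA (cs : List Char) (phonemes : List String) (i : Nat) : List String :=
  if i < cs.length then
    match (if i + 1 < cs.length then
             PySem.Dict.get? pvClusters (String.ofList (PySem.List.slice cs (some (i : Int)) (some ((i : Int) + 2))))
           else none) with
    | some m => pvLoopA cs (phonemes ++ [m]) (i + 2)
    | none =>
      match PySem.Dict.get? pvFallback (String.ofList [PySem.List.pyGetD cs (i : Int) ' ']) with
      | some m => pvLoopA cs (phonemes ++ [m]) (i + 1)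
      | none => pvLoopA cs phonemes (i + 1)
  else phonemes
termination_by cs.length - i
decreasing_by · omega
              · omega
              · omega

def approximate_word_to_phonemes (word : String) : List String :=
  let phonemes := pvLoopA word.toList [] 0
  if phonemes.isEmpty then ["AH"] else phonemes

-- ===== PORT B =====
-- merged token map _TOKEN_PHONEMES: cluster keys first, then single letters
def pvMerged : PySem.Dict String String := ⟨[("th", "TH"), ("sh", "SH"), ("ch", "CH"), ("ph", "F"), ("wh", "W"), ("ck", "K"), ("ng", "N"), ("a", "AH"), ("b", "B"), ("c", "K"), ("d", "D"), ("e", "EH"), ("f", "F"), ("g", "G"), ("h", "HH"), ("i", "IH"), ("j", "JH"), ("k", "K"), ("l", "L"), ("m", "M"), ("n", "N"), ("o", "OW"), ("p", "P"), ("q", "K"), ("r", "R"), ("s", "S"), ("t", "T"), ("u", "UW"), ("v", "V"), ("w", "W"), ("x", "S"), ("y", "Y"), ("z", "Z")]⟩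

-- the compiled alternation _TOKEN_RX = th|sh|ch|ph|wh|ck|ng|a|...|z, as its ordered list of literal alternatives
def pvTokenKeys : List (List Char) :=
  [['t', 'h'], ['s', 'h'], ['c', 'h'], ['p', 'h'], ['w', 'h'], ['c', 'k'], ['n', 'g'],
   ['a'], ['b'], ['c'], ['d'], ['e'], ['f'], ['g'], ['h'], ['i'], ['j'], ['k'], ['l'], ['m'], ['n'], ['o'], ['p'], ['q'], ['r'], ['s'], ['t'], ['u'], ['v'], ['w'], ['x'], ['y'], ['z']]

-- re.findall for an alternation of literal strings (exact for this pattern): at each position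
-- the leftmost alternative matching there is taken and the scan resumes after it; with no
-- match the scan advances one character.
def pvFindall : List Char → List (List Char)
  | [] => []
  | c :: rest =>
    match pvTokenKeys.find? (fun t => t.isPrefixOf (c :: rest)) with
    | some t => t :: pvFindall (rest.drop (t.length - 1))
    | none => pvFindall rest
termination_by cs => cs.length
decreasing_by all_goals (simp only [List.length_drop, List.length_cons]; omega)

-- _TOKEN_PHONEMES[m]; findall only returns keys of the map, so the default is never used
def pvPh (m : List Char) : String := PySem.Dict.getD pvMerged (String.ofList m) ""

def approximate_word_to_phonemes_alt (word : String) : List String :=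
  let phonemes := (pvFindall word.toList).map pvPh
  if phonemes.isEmpty then ["AH"] else phonemes

-- ===== PRECONDITION & SPEC =====
def Spec_approximate_word_to_phonemes (word : String) (out : List String) : Prop := out = approximate_word_to_phonemes_alt word
instance (word : String) (out : List String) : Decidable (Spec_approximate_word_to_phonemes word out) := by unfold Spec_approximate_word_to_phonemes; infer_instance

-- ===== CLAIM (what is proved, stated in full; the proofs are below) =====
def Claim_equal_approximate_word_to_phonemes : Prop := ∀ (word : String), Dom_approximate_word_to_phonemes word → Spec_approximate_word_to_phonemes word (approximate_word_to_phonemes word)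

-- ===== LEMMAS AND PROOFS =====

@[simp] theorem pvPh_th : pvPh ['t', 'h'] = "TH" := rfl
@[simp] theorem pvPh_sh : pvPh ['s', 'h'] = "SH" := rfl
@[simp] theorem pvPh_ch : pvPh ['c', 'h'] = "CH" := rfl
@[simp] theorem pvPh_ph : pvPh ['p', 'h'] = "F" := rfl
@[simp] theorem pvPh_wh : pvPh ['w', 'h'] = "W" := rfl
@[simp] theorem pvPh_ck : pvPh ['c', 'k'] = "K" := rfl
@[simp] theorem pvPh_ng : pvPh ['n', 'g'] = "N" := rfl
@[simp] theorem pvPh_a : pvPh ['a'] = "AH" := rfl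
@[simp] theorem pvPh_b : pvPh ['b'] = "B" := rfl
@[simp] theorem pvPh_c : pvPh ['c'] = "K" := rfl
@[simp] theorem pvPh_d : pvPh ['d'] = "D" := rfl
@[simp] theorem pvPh_e : pvPh ['e'] = "EH" := rfl
@[simp] theorem pvPh_f : pvPh ['f'] = "F" := rfl
@[simp] theorem pvPh_g : pvPh ['g'] = "G" := rfl
@[simp] theorem pvPh_h : pvPh ['h'] = "HH" := rfl
@[simp] theorem pvPh_i : pvPh ['i'] = "IH" := rfl
@[simp] theorem pvPh_j : pvPh ['j'] = "JH" := rfl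
@[simp] theorem pvPh_k : pvPh ['k'] = "K" := rfl
@[simp] theorem pvPh_l : pvPh ['l'] = "L" := rfl
@[simp] theorem pvPh_m : pvPh ['m'] = "M" := rfl
@[simp] theorem pvPh_n : pvPh ['n'] = "N" := rfl
@[simp] theorem pvPh_o : pvPh ['o'] = "OW" := rfl
@[simp] theorem pvPh_p : pvPh ['p'] = "P" := rfl
@[simp] theorem pvPh_q : pvPh ['q'] = "K" := rfl
@[simp] theorem pvPh_r : pvPh ['r'] = "R" := rfl
@[simp] theorem pvPh_s : pvPh ['s'] = "S" := rfl
@[simp] theorem pvPh_t : pvPh ['t'] = "T" := rfl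
@[simp] theorem pvPh_u : pvPh ['u'] = "UW" := rfl
@[simp] theorem pvPh_v : pvPh ['v'] = "V" := rfl
@[simp] theorem pvPh_w : pvPh ['w'] = "W" := rfl
@[simp] theorem pvPh_x : pvPh ['x'] = "S" := rfl
@[simp] theorem pvPh_y : pvPh ['y'] = "Y" := rfl
@[simp] theorem pvPh_z : pvPh ['z'] = "Z" := rfl

@[simp] theorem pvFindall_nil : pvFindall [] = [] := by rw [pvFindall]

-- B's findall step when A's cluster lookup hits
theorem pvStepSome2 (c c2 : Char) (m : String) (r : List Char)
    (hc : PySem.Dict.get? pvClusters (String.ofList [c, c2]) = some m) :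
    (pvFindall (c :: c2 :: r)).map pvPh = m :: (pvFindall r).map pvPh := by
  replace hc := PySem.Dict.mem_items_of_get?_eq_some _ hc
  simp only [pvClusters, List.mem_cons, List.not_mem_nil, or_false,
    Prod.mk.injEq] at hc
  rcases hc with ⟨hk, rfl⟩ | ⟨hk, rfl⟩ | ⟨hk, rfl⟩ | ⟨hk, rfl⟩ | ⟨hk, rfl⟩ | ⟨hk, rfl⟩ | ⟨hk, rfl⟩
  · rw [show ("th" : String) = String.ofList ['t', 'h'] from rfl] at hk
    obtain ⟨rfl, rfl⟩ : c = 't' ∧ c2 = 'h' := by simpa using String.ofList_inj.mp hk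
    rw [pvFindall]
    simp [pvTokenKeys, List.isPrefixOf]
  · rw [show ("sh" : String) = String.ofList ['s', 'h'] from rfl] at hk
    obtain ⟨rfl, rfl⟩ : c = 's' ∧ c2 = 'h' := by simpa using String.ofList_inj.mp hk
    rw [pvFindall]
    simp [pvTokenKeys, List.isPrefixOf]
  · rw [show ("ch" : String) = String.ofList ['c', 'h'] from rfl] at hk
    obtain ⟨rfl, rfl⟩ : c = 'c' ∧ c2 = 'h' := by simpa using String.ofList_inj.mp hk
    rw [pvFindall]
    simp [pvTokenKeys, List.isPrefixOf]
  · rw [show ("ph" : String) = String.ofList ['p', 'h'] from rfl] at hk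
    obtain ⟨rfl, rfl⟩ : c = 'p' ∧ c2 = 'h' := by simpa using String.ofList_inj.mp hk
    rw [pvFindall]
    simp [pvTokenKeys, List.isPrefixOf]
  · rw [show ("wh" : String) = String.ofList ['w', 'h'] from rfl] at hk
    obtain ⟨rfl, rfl⟩ : c = 'w' ∧ c2 = 'h' := by simpa using String.ofList_inj.mp hk
    rw [pvFindall]
    simp [pvTokenKeys, List.isPrefixOf]
  · rw [show ("ck" : String) = String.ofList ['c', 'k'] from rfl] at hk
    obtain ⟨rfl, rfl⟩ : c = 'c' ∧ c2 = 'k' := by simpa using String.ofList_inj.mp hk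
    rw [pvFindall]
    simp [pvTokenKeys, List.isPrefixOf]
  · rw [show ("ng" : String) = String.ofList ['n', 'g'] from rfl] at hk
    obtain ⟨rfl, rfl⟩ : c = 'n' ∧ c2 = 'g' := by simpa using String.ofList_inj.mp hk
    rw [pvFindall]
    simp [pvTokenKeys, List.isPrefixOf]

-- B's findall step when A's cluster lookup misses and the fallback lookup hits
theorem pvStepNone2 (c c2 : Char) (m : String) (r : List Char)
    (hc : PySem.Dict.get? pvClusters (String.ofList [c, c2]) = none)
    (hf : PySem.Dict.get? pvFallback (String.ofList [c]) = some m) :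
    (pvFindall (c :: c2 :: r)).map pvPh = m :: (pvFindall (c2 :: r)).map pvPh := by
  replace hf := PySem.Dict.mem_items_of_get?_eq_some _ hf
  simp only [pvFallback, List.mem_cons, List.not_mem_nil, or_false,
    Prod.mk.injEq] at hf
  rcases hf with ⟨hk, rfl⟩ | ⟨hk, rfl⟩ | ⟨hk, rfl⟩ | ⟨hk, rfl⟩ | ⟨hk, rfl⟩ | ⟨hk, rfl⟩ | ⟨hk, rfl⟩ | ⟨hk, rfl⟩ | ⟨hk, rfl⟩ | ⟨hk, rfl⟩ | ⟨hk, rfl⟩ | ⟨hk, rfl⟩ | ⟨hk, rfl⟩ | ⟨hk, rfl⟩ | ⟨hk, rfl⟩ | ⟨hk, rfl⟩ | ⟨hk, rfl⟩ | ⟨hk, rfl⟩ | ⟨hk, rfl⟩ | ⟨hk, rfl⟩ | ⟨hk, rfl⟩ | ⟨hk, rfl⟩ | ⟨hk, rfl⟩ | ⟨hk, rfl⟩ | ⟨hk, rfl⟩ | ⟨hk, rfl⟩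
  · rw [show ("a" : String) = String.ofList ['a'] from rfl] at hk
    obtain rfl : c = 'a' := by simpa using String.ofList_inj.mp hk
    rw [pvFindall]
    simp [pvTokenKeys, List.isPrefixOf]
  · rw [show ("b" : String) = String.ofList ['b'] from rfl] at hk
    obtain rfl : c = 'b' := by simpa using String.ofList_inj.mp hk
    rw [pvFindall]
    simp [pvTokenKeys, List.isPrefixOf]
  · rw [show ("c" : String) = String.ofList ['c'] from rfl] at hk
    obtain rfl : c = 'c' := by simpa using String.ofList_inj.mp hk
    have hx0 : ¬ ('h' = c2) := by intro e; rw [← e] at hc; exact absurd hc (by decide)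
    have hx1 : ¬ ('k' = c2) := by intro e; rw [← e] at hc; exact absurd hc (by decide)
    rw [pvFindall]
    simp [pvTokenKeys, List.isPrefixOf, hx0, hx1]
  · rw [show ("d" : String) = String.ofList ['d'] from rfl] at hk
    obtain rfl : c = 'd' := by simpa using String.ofList_inj.mp hk
    rw [pvFindall]
    simp [pvTokenKeys, List.isPrefixOf]
  · rw [show ("e" : String) = String.ofList ['e'] from rfl] at hk
    obtain rfl : c = 'e' := by simpa using String.ofList_inj.mp hk
    rw [pvFindall]
    simp [pvTokenKeys, List.isPrefixOf]
  · rw [show ("f" : String) = String.ofList ['f'] from rfl] at hk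
    obtain rfl : c = 'f' := by simpa using String.ofList_inj.mp hk
    rw [pvFindall]
    simp [pvTokenKeys, List.isPrefixOf]
  · rw [show ("g" : String) = String.ofList ['g'] from rfl] at hk
    obtain rfl : c = 'g' := by simpa using String.ofList_inj.mp hk
    rw [pvFindall]
    simp [pvTokenKeys, List.isPrefixOf]
  · rw [show ("h" : String) = String.ofList ['h'] from rfl] at hk
    obtain rfl : c = 'h' := by simpa using String.ofList_inj.mp hk
    rw [pvFindall]
    simp [pvTokenKeys, List.isPrefixOf]
  · rw [show ("i" : String) = String.ofList ['i'] from rfl] at hk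
    obtain rfl : c = 'i' := by simpa using String.ofList_inj.mp hk
    rw [pvFindall]
    simp [pvTokenKeys, List.isPrefixOf]
  · rw [show ("j" : String) = String.ofList ['j'] from rfl] at hk
    obtain rfl : c = 'j' := by simpa using String.ofList_inj.mp hk
    rw [pvFindall]
    simp [pvTokenKeys, List.isPrefixOf]
  · rw [show ("k" : String) = String.ofList ['k'] from rfl] at hk
    obtain rfl : c = 'k' := by simpa using String.ofList_inj.mp hk
    rw [pvFindall]
    simp [pvTokenKeys, List.isPrefixOf]
  · rw [show ("l" : String) = String.ofList ['l'] from rfl] at hk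
    obtain rfl : c = 'l' := by simpa using String.ofList_inj.mp hk
    rw [pvFindall]
    simp [pvTokenKeys, List.isPrefixOf]
  · rw [show ("m" : String) = String.ofList ['m'] from rfl] at hk
    obtain rfl : c = 'm' := by simpa using String.ofList_inj.mp hk
    rw [pvFindall]
    simp [pvTokenKeys, List.isPrefixOf]
  · rw [show ("n" : String) = String.ofList ['n'] from rfl] at hk
    obtain rfl : c = 'n' := by simpa using String.ofList_inj.mp hk
    have hx0 : ¬ ('g' = c2) := by intro e; rw [← e] at hc; exact absurd hc (by decide)
    rw [pvFindall]
    simp [pvTokenKeys, List.isPrefixOf, hx0]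
  · rw [show ("o" : String) = String.ofList ['o'] from rfl] at hk
    obtain rfl : c = 'o' := by simpa using String.ofList_inj.mp hk
    rw [pvFindall]
    simp [pvTokenKeys, List.isPrefixOf]
  · rw [show ("p" : String) = String.ofList ['p'] from rfl] at hk
    obtain rfl : c = 'p' := by simpa using String.ofList_inj.mp hk
    have hx0 : ¬ ('h' = c2) := by intro e; rw [← e] at hc; exact absurd hc (by decide)
    rw [pvFindall]
    simp [pvTokenKeys, List.isPrefixOf, hx0]
  · rw [show ("q" : String) = String.ofList ['q'] from rfl] at hk
    obtain rfl : c = 'q' := by simpa using String.ofList_inj.mp hk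
    rw [pvFindall]
    simp [pvTokenKeys, List.isPrefixOf]
  · rw [show ("r" : String) = String.ofList ['r'] from rfl] at hk
    obtain rfl : c = 'r' := by simpa using String.ofList_inj.mp hk
    rw [pvFindall]
    simp [pvTokenKeys, List.isPrefixOf]
  · rw [show ("s" : String) = String.ofList ['s'] from rfl] at hk
    obtain rfl : c = 's' := by simpa using String.ofList_inj.mp hk
    have hx0 : ¬ ('h' = c2) := by intro e; rw [← e] at hc; exact absurd hc (by decide)
    rw [pvFindall]
    simp [pvTokenKeys, List.isPrefixOf, hx0]
  · rw [show ("t" : String) = String.ofList ['t'] from rfl] at hk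
    obtain rfl : c = 't' := by simpa using String.ofList_inj.mp hk
    have hx0 : ¬ ('h' = c2) := by intro e; rw [← e] at hc; exact absurd hc (by decide)
    rw [pvFindall]
    simp [pvTokenKeys, List.isPrefixOf, hx0]
  · rw [show ("u" : String) = String.ofList ['u'] from rfl] at hk
    obtain rfl : c = 'u' := by simpa using String.ofList_inj.mp hk
    rw [pvFindall]
    simp [pvTokenKeys, List.isPrefixOf]
  · rw [show ("v" : String) = String.ofList ['v'] from rfl] at hk
    obtain rfl : c = 'v' := by simpa using String.ofList_inj.mp hk
    rw [pvFindall]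
    simp [pvTokenKeys, List.isPrefixOf]
  · rw [show ("w" : String) = String.ofList ['w'] from rfl] at hk
    obtain rfl : c = 'w' := by simpa using String.ofList_inj.mp hk
    have hx0 : ¬ ('h' = c2) := by intro e; rw [← e] at hc; exact absurd hc (by decide)
    rw [pvFindall]
    simp [pvTokenKeys, List.isPrefixOf, hx0]
  · rw [show ("x" : String) = String.ofList ['x'] from rfl] at hk
    obtain rfl : c = 'x' := by simpa using String.ofList_inj.mp hk
    rw [pvFindall]
    simp [pvTokenKeys, List.isPrefixOf]
  · rw [show ("y" : String) = String.ofList ['y'] from rfl] at hk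
    obtain rfl : c = 'y' := by simpa using String.ofList_inj.mp hk
    rw [pvFindall]
    simp [pvTokenKeys, List.isPrefixOf]
  · rw [show ("z" : String) = String.ofList ['z'] from rfl] at hk
    obtain rfl : c = 'z' := by simpa using String.ofList_inj.mp hk
    rw [pvFindall]
    simp [pvTokenKeys, List.isPrefixOf]

-- B's findall step when both of A's lookups miss
theorem pvStepNone2' (c c2 : Char) (r : List Char)
    (hc : PySem.Dict.get? pvClusters (String.ofList [c, c2]) = none)
    (hf : PySem.Dict.get? pvFallback (String.ofList [c]) = none) :
    (pvFindall (c :: c2 :: r)).map pvPh = (pvFindall (c2 :: r)).map pvPh := by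
  have hna : ¬ ('a' = c) := by intro e; rw [← e] at hf; exact absurd hf (by decide)
  have hnb : ¬ ('b' = c) := by intro e; rw [← e] at hf; exact absurd hf (by decide)
  have hnc : ¬ ('c' = c) := by intro e; rw [← e] at hf; exact absurd hf (by decide)
  have hnd : ¬ ('d' = c) := by intro e; rw [← e] at hf; exact absurd hf (by decide)
  have hne : ¬ ('e' = c) := by intro e; rw [← e] at hf; exact absurd hf (by decide)
  have hnf : ¬ ('f' = c) := by intro e; rw [← e] at hf; exact absurd hf (by decide)
  have hng : ¬ ('g' = c) := by intro e; rw [← e] at hf; exact absurd hf (by decide)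
  have hnh : ¬ ('h' = c) := by intro e; rw [← e] at hf; exact absurd hf (by decide)
  have hni : ¬ ('i' = c) := by intro e; rw [← e] at hf; exact absurd hf (by decide)
  have hnj : ¬ ('j' = c) := by intro e; rw [← e] at hf; exact absurd hf (by decide)
  have hnk : ¬ ('k' = c) := by intro e; rw [← e] at hf; exact absurd hf (by decide)
  have hnl : ¬ ('l' = c) := by intro e; rw [← e] at hf; exact absurd hf (by decide)
  have hnm : ¬ ('m' = c) := by intro e; rw [← e] at hf; exact absurd hf (by decide)
  have hnn : ¬ ('n' = c) := by intro e; rw [← e] at hf; exact absurd hf (by decide)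
  have hno : ¬ ('o' = c) := by intro e; rw [← e] at hf; exact absurd hf (by decide)
  have hnp : ¬ ('p' = c) := by intro e; rw [← e] at hf; exact absurd hf (by decide)
  have hnq : ¬ ('q' = c) := by intro e; rw [← e] at hf; exact absurd hf (by decide)
  have hnr : ¬ ('r' = c) := by intro e; rw [← e] at hf; exact absurd hf (by decide)
  have hns : ¬ ('s' = c) := by intro e; rw [← e] at hf; exact absurd hf (by decide)
  have hnt : ¬ ('t' = c) := by intro e; rw [← e] at hf; exact absurd hf (by decide)
  have hnu : ¬ ('u' = c) := by intro e; rw [← e] at hf; exact absurd hf (by decide)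
  have hnv : ¬ ('v' = c) := by intro e; rw [← e] at hf; exact absurd hf (by decide)
  have hnw : ¬ ('w' = c) := by intro e; rw [← e] at hf; exact absurd hf (by decide)
  have hnx : ¬ ('x' = c) := by intro e; rw [← e] at hf; exact absurd hf (by decide)
  have hny : ¬ ('y' = c) := by intro e; rw [← e] at hf; exact absurd hf (by decide)
  have hnz : ¬ ('z' = c) := by intro e; rw [← e] at hf; exact absurd hf (by decide)
  rw [pvFindall]
  simp [pvTokenKeys, List.isPrefixOf, hna, hnb, hnc, hnd, hne, hnf, hng, hnh, hni, hnj, hnk, hnl, hnm, hnn, hno, hnp, hnq, hnr, hns, hnt, hnu, hnv, hnw, hnx, hny, hnz]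

-- B's findall step on a final single character, fallback hit
theorem pvStepSome1 (c : Char) (m : String)
    (hf : PySem.Dict.get? pvFallback (String.ofList [c]) = some m) :
    (pvFindall [c]).map pvPh = [m] := by
  replace hf := PySem.Dict.mem_items_of_get?_eq_some _ hf
  simp only [pvFallback, List.mem_cons, List.not_mem_nil, or_false,
    Prod.mk.injEq] at hf
  rcases hf with ⟨hk, rfl⟩ | ⟨hk, rfl⟩ | ⟨hk, rfl⟩ | ⟨hk, rfl⟩ | ⟨hk, rfl⟩ | ⟨hk, rfl⟩ | ⟨hk, rfl⟩ | ⟨hk, rfl⟩ | ⟨hk, rfl⟩ | ⟨hk, rfl⟩ | ⟨hk, rfl⟩ | ⟨hk, rfl⟩ | ⟨hk, rfl⟩ | ⟨hk, rfl⟩ | ⟨hk, rfl⟩ | ⟨hk, rfl⟩ | ⟨hk, rfl⟩ | ⟨hk, rfl⟩ | ⟨hk, rfl⟩ | ⟨hk, rfl⟩ | ⟨hk, rfl⟩ | ⟨hk, rfl⟩ | ⟨hk, rfl⟩ | ⟨hk, rfl⟩ | ⟨hk, rfl⟩ | ⟨hk, rfl⟩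
  · rw [show ("a" : String) = String.ofList ['a'] from rfl] at hk
    obtain rfl : c = 'a' := by simpa using String.ofList_inj.mp hk
    rw [pvFindall]
    simp [pvTokenKeys, List.isPrefixOf]
  · rw [show ("b" : String) = String.ofList ['b'] from rfl] at hk
    obtain rfl : c = 'b' := by simpa using String.ofList_inj.mp hk
    rw [pvFindall]
    simp [pvTokenKeys, List.isPrefixOf]
  · rw [show ("c" : String) = String.ofList ['c'] from rfl] at hk
    obtain rfl : c = 'c' := by simpa using String.ofList_inj.mp hk
    rw [pvFindall]
    simp [pvTokenKeys, List.isPrefixOf]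
  · rw [show ("d" : String) = String.ofList ['d'] from rfl] at hk
    obtain rfl : c = 'd' := by simpa using String.ofList_inj.mp hk
    rw [pvFindall]
    simp [pvTokenKeys, List.isPrefixOf]
  · rw [show ("e" : String) = String.ofList ['e'] from rfl] at hk
    obtain rfl : c = 'e' := by simpa using String.ofList_inj.mp hk
    rw [pvFindall]
    simp [pvTokenKeys, List.isPrefixOf]
  · rw [show ("f" : String) = String.ofList ['f'] from rfl] at hk
    obtain rfl : c = 'f' := by simpa using String.ofList_inj.mp hk
    rw [pvFindall]
    simp [pvTokenKeys, List.isPrefixOf]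
  · rw [show ("g" : String) = String.ofList ['g'] from rfl] at hk
    obtain rfl : c = 'g' := by simpa using String.ofList_inj.mp hk
    rw [pvFindall]
    simp [pvTokenKeys, List.isPrefixOf]
  · rw [show ("h" : String) = String.ofList ['h'] from rfl] at hk
    obtain rfl : c = 'h' := by simpa using String.ofList_inj.mp hk
    rw [pvFindall]
    simp [pvTokenKeys, List.isPrefixOf]
  · rw [show ("i" : String) = String.ofList ['i'] from rfl] at hk
    obtain rfl : c = 'i' := by simpa using String.ofList_inj.mp hk
    rw [pvFindall]
    simp [pvTokenKeys, List.isPrefixOf]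
  · rw [show ("j" : String) = String.ofList ['j'] from rfl] at hk
    obtain rfl : c = 'j' := by simpa using String.ofList_inj.mp hk
    rw [pvFindall]
    simp [pvTokenKeys, List.isPrefixOf]
  · rw [show ("k" : String) = String.ofList ['k'] from rfl] at hk
    obtain rfl : c = 'k' := by simpa using String.ofList_inj.mp hk
    rw [pvFindall]
    simp [pvTokenKeys, List.isPrefixOf]
  · rw [show ("l" : String) = String.ofList ['l'] from rfl] at hk
    obtain rfl : c = 'l' := by simpa using String.ofList_inj.mp hk
    rw [pvFindall]
    simp [pvTokenKeys, List.isPrefixOf]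
  · rw [show ("m" : String) = String.ofList ['m'] from rfl] at hk
    obtain rfl : c = 'm' := by simpa using String.ofList_inj.mp hk
    rw [pvFindall]
    simp [pvTokenKeys, List.isPrefixOf]
  · rw [show ("n" : String) = String.ofList ['n'] from rfl] at hk
    obtain rfl : c = 'n' := by simpa using String.ofList_inj.mp hk
    rw [pvFindall]
    simp [pvTokenKeys, List.isPrefixOf]
  · rw [show ("o" : String) = String.ofList ['o'] from rfl] at hk
    obtain rfl : c = 'o' := by simpa using String.ofList_inj.mp hk
    rw [pvFindall]
    simp [pvTokenKeys, List.isPrefixOf]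
  · rw [show ("p" : String) = String.ofList ['p'] from rfl] at hk
    obtain rfl : c = 'p' := by simpa using String.ofList_inj.mp hk
    rw [pvFindall]
    simp [pvTokenKeys, List.isPrefixOf]
  · rw [show ("q" : String) = String.ofList ['q'] from rfl] at hk
    obtain rfl : c = 'q' := by simpa using String.ofList_inj.mp hk
    rw [pvFindall]
    simp [pvTokenKeys, List.isPrefixOf]
  · rw [show ("r" : String) = String.ofList ['r'] from rfl] at hk
    obtain rfl : c = 'r' := by simpa using String.ofList_inj.mp hk
    rw [pvFindall]
    simp [pvTokenKeys, List.isPrefixOf]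
  · rw [show ("s" : String) = String.ofList ['s'] from rfl] at hk
    obtain rfl : c = 's' := by simpa using String.ofList_inj.mp hk
    rw [pvFindall]
    simp [pvTokenKeys, List.isPrefixOf]
  · rw [show ("t" : String) = String.ofList ['t'] from rfl] at hk
    obtain rfl : c = 't' := by simpa using String.ofList_inj.mp hk
    rw [pvFindall]
    simp [pvTokenKeys, List.isPrefixOf]
  · rw [show ("u" : String) = String.ofList ['u'] from rfl] at hk
    obtain rfl : c = 'u' := by simpa using String.ofList_inj.mp hk
    rw [pvFindall]
    simp [pvTokenKeys, List.isPrefixOf]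
  · rw [show ("v" : String) = String.ofList ['v'] from rfl] at hk
    obtain rfl : c = 'v' := by simpa using String.ofList_inj.mp hk
    rw [pvFindall]
    simp [pvTokenKeys, List.isPrefixOf]
  · rw [show ("w" : String) = String.ofList ['w'] from rfl] at hk
    obtain rfl : c = 'w' := by simpa using String.ofList_inj.mp hk
    rw [pvFindall]
    simp [pvTokenKeys, List.isPrefixOf]
  · rw [show ("x" : String) = String.ofList ['x'] from rfl] at hk
    obtain rfl : c = 'x' := by simpa using String.ofList_inj.mp hk
    rw [pvFindall]
    simp [pvTokenKeys, List.isPrefixOf]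
  · rw [show ("y" : String) = String.ofList ['y'] from rfl] at hk
    obtain rfl : c = 'y' := by simpa using String.ofList_inj.mp hk
    rw [pvFindall]
    simp [pvTokenKeys, List.isPrefixOf]
  · rw [show ("z" : String) = String.ofList ['z'] from rfl] at hk
    obtain rfl : c = 'z' := by simpa using String.ofList_inj.mp hk
    rw [pvFindall]
    simp [pvTokenKeys, List.isPrefixOf]

-- B's findall step on a final single character, fallback miss
theorem pvStepNone1 (c : Char)
    (hf : PySem.Dict.get? pvFallback (String.ofList [c]) = none) :
    (pvFindall [c]).map pvPh = [] := by
  have hna : ¬ ('a' = c) := by intro e; rw [← e] at hf; exact absurd hf (by decide)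
  have hnb : ¬ ('b' = c) := by intro e; rw [← e] at hf; exact absurd hf (by decide)
  have hnc : ¬ ('c' = c) := by intro e; rw [← e] at hf; exact absurd hf (by decide)
  have hnd : ¬ ('d' = c) := by intro e; rw [← e] at hf; exact absurd hf (by decide)
  have hne : ¬ ('e' = c) := by intro e; rw [← e] at hf; exact absurd hf (by decide)
  have hnf : ¬ ('f' = c) := by intro e; rw [← e] at hf; exact absurd hf (by decide)
  have hng : ¬ ('g' = c) := by intro e; rw [← e] at hf; exact absurd hf (by decide)
  have hnh : ¬ ('h' = c) := by intro e; rw [← e] at hf; exact absurd hf (by decide)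
  have hni : ¬ ('i' = c) := by intro e; rw [← e] at hf; exact absurd hf (by decide)
  have hnj : ¬ ('j' = c) := by intro e; rw [← e] at hf; exact absurd hf (by decide)
  have hnk : ¬ ('k' = c) := by intro e; rw [← e] at hf; exact absurd hf (by decide)
  have hnl : ¬ ('l' = c) := by intro e; rw [← e] at hf; exact absurd hf (by decide)
  have hnm : ¬ ('m' = c) := by intro e; rw [← e] at hf; exact absurd hf (by decide)
  have hnn : ¬ ('n' = c) := by intro e; rw [← e] at hf; exact absurd hf (by decide)
  have hno : ¬ ('o' = c) := by intro e; rw [← e] at hf; exact absurd hf (by decide)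
  have hnp : ¬ ('p' = c) := by intro e; rw [← e] at hf; exact absurd hf (by decide)
  have hnq : ¬ ('q' = c) := by intro e; rw [← e] at hf; exact absurd hf (by decide)
  have hnr : ¬ ('r' = c) := by intro e; rw [← e] at hf; exact absurd hf (by decide)
  have hns : ¬ ('s' = c) := by intro e; rw [← e] at hf; exact absurd hf (by decide)
  have hnt : ¬ ('t' = c) := by intro e; rw [← e] at hf; exact absurd hf (by decide)
  have hnu : ¬ ('u' = c) := by intro e; rw [← e] at hf; exact absurd hf (by decide)
  have hnv : ¬ ('v' = c) := by intro e; rw [← e] at hf; exact absurd hf (by decide)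
  have hnw : ¬ ('w' = c) := by intro e; rw [← e] at hf; exact absurd hf (by decide)
  have hnx : ¬ ('x' = c) := by intro e; rw [← e] at hf; exact absurd hf (by decide)
  have hny : ¬ ('y' = c) := by intro e; rw [← e] at hf; exact absurd hf (by decide)
  have hnz : ¬ ('z' = c) := by intro e; rw [← e] at hf; exact absurd hf (by decide)
  rw [pvFindall]
  simp [pvTokenKeys, List.isPrefixOf, hna, hnb, hnc, hnd, hne, hnf, hng, hnh, hni, hnj, hnk, hnl, hnm, hnn, hno, hnp, hnq, hnr, hns, hnt, hnu, hnv, hnw, hnx, hny, hnz]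

theorem pvSliceTake (cs : List Char) (i : Nat) :
    PySem.List.slice cs (some (i : Int)) (some ((i : Int) + 2)) = (cs.drop i).take 2 := by
  have h := PySem.List.slice_natCast_add cs i 2
  exact_mod_cast h

theorem pvMain (cs : List Char) (phonemes : List String) (i : Nat) :
    pvLoopA cs phonemes i = phonemes ++ (pvFindall (cs.drop i)).map pvPh := by
  induction phonemes, i using pvLoopA.induct cs with
  | case1 ph i h m hc ih =>
    have h2 : i + 1 < cs.length := by
      by_contra h2
      rw [dif_neg h2] at hc
      simp at hc
    rw [dif_pos h2] at hc
    have hd : cs.drop i = cs[i] :: cs[i+1] :: cs.drop (i+2) := by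
      rw [List.drop_eq_getElem_cons h, List.drop_eq_getElem_cons h2]
    have hc2 : PySem.Dict.get? pvClusters (String.ofList [cs[i], cs[i+1]]) = some m := by
      rw [pvSliceTake, hd] at hc
      exact hc
    rw [pvLoopA, if_pos h, if_pos h2, hc]
    show pvLoopA cs (ph ++ [m]) (i + 2) = ph ++ (pvFindall (cs.drop i)).map pvPh
    rw [ih, hd, pvStepSome2 _ _ _ _ hc2]
    simp
  | case2 ph i h hc m hf ih =>
    have hg : PySem.List.pyGetD cs (i : Int) ' ' = cs[i] := by
      rw [PySem.List.pyGetD_natCast]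
      exact List.getD_eq_getElem cs ' ' h
    rw [hg] at hf
    by_cases h2 : i + 1 < cs.length
    · rw [dif_pos h2] at hc
      have hd : cs.drop i = cs[i] :: cs[i+1] :: cs.drop (i+2) := by
        rw [List.drop_eq_getElem_cons h, List.drop_eq_getElem_cons h2]
      have hc2 : PySem.Dict.get? pvClusters (String.ofList [cs[i], cs[i+1]]) = none := by
        rw [pvSliceTake, hd] at hc
        exact hc
      rw [pvLoopA, if_pos h, if_pos h2, hc, hg, hf]
      show pvLoopA cs (ph ++ [m]) (i + 1) = ph ++ (pvFindall (cs.drop i)).map pvPh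
      rw [ih, hd, pvStepNone2 _ _ _ _ hc2 hf]
      simp
    · have hd : cs.drop i = [cs[i]] := by
        rw [List.drop_eq_getElem_cons h, List.drop_eq_nil_of_le (by omega)]
      rw [pvLoopA, if_pos h, if_neg h2, hg, hf]
      show pvLoopA cs (ph ++ [m]) (i + 1) = ph ++ (pvFindall (cs.drop i)).map pvPh
      rw [ih, List.drop_eq_nil_of_le (by omega), hd, pvStepSome1 _ _ hf]
      simp
  | case3 ph i h hc hf ih =>
    have hg : PySem.List.pyGetD cs (i : Int) ' ' = cs[i] := by
      rw [PySem.List.pyGetD_natCast]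
      exact List.getD_eq_getElem cs ' ' h
    rw [hg] at hf
    by_cases h2 : i + 1 < cs.length
    · rw [dif_pos h2] at hc
      have hd : cs.drop i = cs[i] :: cs[i+1] :: cs.drop (i+2) := by
        rw [List.drop_eq_getElem_cons h, List.drop_eq_getElem_cons h2]
      have hc2 : PySem.Dict.get? pvClusters (String.ofList [cs[i], cs[i+1]]) = none := by
        rw [pvSliceTake, hd] at hc
        exact hc
      rw [pvLoopA, if_pos h, if_pos h2, hc, hg, hf]
      show pvLoopA cs ph (i + 1) = ph ++ (pvFindall (cs.drop i)).map pvPh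
      rw [ih, hd, pvStepNone2' _ _ _ hc2 hf,
         show List.drop (i + 1) cs = cs[i + 1] :: List.drop (i + 2) cs from List.drop_eq_getElem_cons h2]
    · have hd : cs.drop i = [cs[i]] := by
        rw [List.drop_eq_getElem_cons h, List.drop_eq_nil_of_le (by omega)]
      rw [pvLoopA, if_pos h, if_neg h2, hg, hf]
      show pvLoopA cs ph (i + 1) = ph ++ (pvFindall (cs.drop i)).map pvPh
      rw [ih, List.drop_eq_nil_of_le (by omega), hd, pvStepNone1 _ hf]
      simp
  | case4 ph i h =>
    rw [pvLoopA, if_neg h, List.drop_eq_nil_of_le (by omega)]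
    simp

-- ===== VERDICT (by name: the statement is the Claim_ definition above) =====
theorem approximate_word_to_phonemes_spec : Claim_equal_approximate_word_to_phonemes := by
  intro word _
  unfold Spec_approximate_word_to_phonemes approximate_word_to_phonemes approximate_word_to_phonemes_alt
  simp [pvMain]
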